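-- pv_equiv track=rewrite | github.com/shiyinw/patternNER | pre/sub.py | find_pattern
-- ===== SOURCE A (Python) =====
-- import string
--
-- def find_pattern(word):
--     '''
--         We find some named entity contains roman number, which is confusing. We treat them simply as word.
--     '''
--     if word.isdigit():
--         return '$N$'
--     elif word in string.punctuation:
--         return word
--     else: # check if subword is $NUMBER$ or $PUNCT$
--         ret = ''
--         prev = ''
--         for w in word:
--             if w in string.punctuation:
--                 ret += w
--                 prev = ''
--             elif w.isdigit():
--                 if prev == '$W$':
--                     ret += '$W$'
--                 prev = '$N$'
--             else:
--                 if prev =='$N$':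
--                     ret += '$N$'
--                 prev = '$W$'
--         ret += prev
--     return ret
-- ===== SOURCE B (Python) =====
-- import string
-- from itertools import groupby
--
--
-- def _classify(c):
--     if c in string.punctuation:
--         return 'P'
--     if c.isdigit():
--         return 'N'
--     return 'W'
--
--
-- def find_pattern(word):
--     if word.isdigit():
--         return '$N$'
--     elif word in string.punctuation:
--         return word
--     # split into maximal runs of same class, then emit per run:
--     # punctuation runs pass through verbatim; a digit/word run emits its
--     # token unless it is immediately followed by a punctuation run.
--     runs = [(k, ''.join(g)) for k, g in groupby(word, _classify)]
--     out = []
--     for i, (k, s) in enumerate(runs):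
--         if k == 'P':
--             out.append(s)
--         elif i + 1 == len(runs) or runs[i + 1][0] != 'P':
--             out.append('$N$' if k == 'N' else '$W$')
--     return ''.join(out)
-- ===== Notes on version B (the rewrite author's own statement) =====
-- stated objective: idiomatic
-- what changed: Replaces A's char-by-char prev-state machine with an itertools.groupby split into maximal punctuation/digit/word runs and a stateless per-run emission rule (a punct run passes through verbatim; a digit/word run emits its token unless immediately followed by a punct run).
import Mathlib
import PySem

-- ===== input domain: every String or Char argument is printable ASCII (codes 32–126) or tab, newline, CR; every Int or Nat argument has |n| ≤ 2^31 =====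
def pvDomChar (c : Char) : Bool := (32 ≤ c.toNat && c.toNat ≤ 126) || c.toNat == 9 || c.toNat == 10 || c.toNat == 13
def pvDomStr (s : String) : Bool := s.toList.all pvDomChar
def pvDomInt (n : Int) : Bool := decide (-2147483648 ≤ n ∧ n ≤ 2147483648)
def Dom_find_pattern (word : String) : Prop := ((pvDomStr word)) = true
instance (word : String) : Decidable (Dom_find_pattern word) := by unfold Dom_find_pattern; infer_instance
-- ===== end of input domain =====

-- B replaces A's char-by-char prev-state machine by a groupby into maximal class runs
-- with a per-run emission rule (idiomatic; same cost).

-- string.punctuation and the two literal tokens, shared by both ports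
def pvPunct : List Char := "!\"#$%&'()*+,-./:;<=>?@[\\]^_`{|}~".toList
def pvTokN : List Char := "$N$".toList
def pvTokW : List Char := "$W$".toList

-- ===== PORT A =====
-- the loop body of A: state = (ret, prev) as char lists
def pvStepA (st : List Char × List Char) (w : Char) : List Char × List Char :=
  if pvPunct.contains w then (st.1 ++ [w], [])
  else if PySem.Chars.isdigit w then
    ((if st.2 = pvTokW then st.1 ++ pvTokW else st.1), pvTokN)
  else
    ((if st.2 = pvTokN then st.1 ++ pvTokN else st.1), pvTokW)

def find_pattern (word : String) : String :=
  if PySem.Str.strIsdigit word then "$N$"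
  else if PySem.Str.isIn word "!\"#$%&'()*+,-./:;<=>?@[\\]^_`{|}~" then word
  else
    let st := word.toList.foldl pvStepA ([], [])
    String.ofList (st.1 ++ st.2)

-- ===== PORT B =====
def pvClassify (c : Char) : Char :=
  if pvPunct.contains c then 'P'
  else if PySem.Chars.isdigit c then 'N'
  else 'W'

-- itertools.groupby: maximal runs of equal class, as (class, run chars)
def pvRuns : List Char → List (Char × List Char)
  | [] => []
  | c :: cs =>
    (pvClassify c, c :: cs.takeWhile (fun d => pvClassify d == pvClassify c)) ::
      pvRuns (cs.dropWhile (fun d => pvClassify d == pvClassify c))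
termination_by cs => cs.length
decreasing_by
  simp only [List.length_cons]
  exact Nat.lt_succ_of_le (List.length_dropWhile_le _ _)

def pvTok (k : Char) : List Char := if k = 'N' then pvTokN else pvTokW

-- the emission loop of B: a 'P' run verbatim; an 'N'/'W' run emits its token
-- unless the next run is a 'P' run
def pvEmit : List (Char × List Char) → List Char
  | [] => []
  | (k, s) :: rest =>
    (if k = 'P' then s
     else match rest with
       | [] => pvTok k
       | (k2, _) :: _ => if k2 = 'P' then [] else pvTok k) ++ pvEmit rest

def find_pattern_alt (word : String) : String :=
  if PySem.Str.strIsdigit word then "$N$"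
  else if PySem.Str.isIn word "!\"#$%&'()*+,-./:;<=>?@[\\]^_`{|}~" then word
  else String.ofList (pvEmit (pvRuns word.toList))

-- ===== PRECONDITION & SPEC =====
def Spec_find_pattern (word : String) (out : String) : Prop := out = find_pattern_alt word
instance (word : String) (out : String) : Decidable (Spec_find_pattern word out) := by unfold Spec_find_pattern; infer_instance

-- ===== CLAIM (what is proved, stated in full; the proofs are below) =====
def Claim_equal_find_pattern : Prop := ∀ (word : String), Dom_find_pattern word → Spec_find_pattern word (find_pattern word)

-- ===== LEMMAS AND PROOFS =====

-- token disequalities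
lemma pv_tokNW : pvTokN ≠ pvTokW := by decide

-- A's loop restated head-recursively: (emitted output, final prev) from prev p
def pvLoopA (p : List Char) : List Char → List Char × List Char
  | [] => ([], p)
  | c :: cs =>
    if pvPunct.contains c then
      ((c :: (pvLoopA [] cs).1), (pvLoopA [] cs).2)
    else if PySem.Chars.isdigit c then
      ((if p = pvTokW then pvTokW else []) ++ (pvLoopA pvTokN cs).1, (pvLoopA pvTokN cs).2)
    else
      ((if p = pvTokN then pvTokN else []) ++ (pvLoopA pvTokW cs).1, (pvLoopA pvTokW cs).2)

lemma pv_foldl_eq_loopA : ∀ (cs : List Char) (acc p : List Char),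
    cs.foldl pvStepA (acc, p) = (acc ++ (pvLoopA p cs).1, (pvLoopA p cs).2) := by
  intro cs
  induction cs with
  | nil => intro acc p; simp [pvLoopA]
  | cons c cs ih =>
    intro acc p
    by_cases hp : c ∈ pvPunct
    · simp [pvStepA, pvLoopA, hp, ih]
    · by_cases hd : PySem.Chars.isdigit c
      · by_cases hw : p = pvTokW <;> simp [pvStepA, pvLoopA, hp, hd, hw, ih]
      · by_cases hn : p = pvTokN <;> simp [pvStepA, pvLoopA, hp, hd, hn, ih]

-- what A's pending prev contributes at the junction to the remainder cs
def pvHi (p : List Char) : List Char → List Char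
  | [] => p
  | c :: _ =>
    if pvClassify c = 'N' ∧ p = pvTokW then pvTokW
    else if pvClassify c = 'W' ∧ p = pvTokN then pvTokN
    else []

lemma pv_tokN_ne_nil : pvTokN ≠ [] := by decide
lemma pv_tokW_ne_nil : pvTokW ≠ [] := by decide

lemma pv_hi_nil : ∀ l, pvHi ([] : List Char) l = [] := by
  intro l
  cases l with
  | nil => rfl
  | cons d ds => simp [pvHi, pv_tokN_ne_nil.symm, pv_tokW_ne_nil.symm]

-- run sublemmas
lemma pv_loopA_punct_run : ∀ (us : List Char), (∀ u ∈ us, pvClassify u = 'P') →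
    ∀ rest, pvLoopA [] (us ++ rest) = (us ++ (pvLoopA [] rest).1, (pvLoopA [] rest).2) := by
  intro us
  induction us with
  | nil => intro _ rest; simp
  | cons u us ih =>
    intro h rest
    have hu : u ∈ pvPunct := by
      have := h u (by simp)
      by_contra hc
      simp [pvClassify, hc] at this
      split_ifs at this <;> simp_all
    simp only [List.cons_append, pvLoopA]
    rw [if_pos (by simpa using hu), ih (fun v hv => h v (by simp [hv])) rest]

lemma pv_loopA_digit_run : ∀ (us : List Char), (∀ u ∈ us, pvClassify u = 'N') →
    ∀ rest, pvLoopA pvTokN (us ++ rest) = pvLoopA pvTokN rest := by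
  intro us
  induction us with
  | nil => intro _ rest; simp
  | cons u us ih =>
    intro h rest
    have hu := h u (by simp)
    have hp : ¬ u ∈ pvPunct := by
      intro hc; simp [pvClassify, hc] at hu
    have hd : PySem.Chars.isdigit u := by
      by_contra hc; simp [pvClassify, hp, hc] at hu
    simp only [List.cons_append, pvLoopA]
    rw [if_neg (by simpa using hp), if_pos hd, if_neg pv_tokNW,
      ih (fun v hv => h v (by simp [hv])) rest]
    simp

lemma pv_loopA_word_run : ∀ (us : List Char), (∀ u ∈ us, pvClassify u = 'W') →
    ∀ rest, pvLoopA pvTokW (us ++ rest) = pvLoopA pvTokW rest := by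
  intro us
  induction us with
  | nil => intro _ rest; simp
  | cons u us ih =>
    intro h rest
    have hu := h u (by simp)
    have hp : ¬ u ∈ pvPunct := by
      intro hc; simp [pvClassify, hc] at hu
    have hd : ¬ PySem.Chars.isdigit u := by
      intro hc; simp [pvClassify, hp, hc] at hu
    simp only [List.cons_append, pvLoopA]
    rw [if_neg (by simpa using hp), if_neg hd, if_neg (Ne.symm pv_tokNW),
      ih (fun v hv => h v (by simp [hv])) rest]
    simp

-- main invariant: A's loop output from prev p = junction contribution + B's run emission
lemma pv_main : ∀ (n : Nat) (cs : List Char), cs.length ≤ n → ∀ (p : List Char),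
    (pvLoopA p cs).1 ++ (pvLoopA p cs).2 = pvHi p cs ++ pvEmit (pvRuns cs) := by
  intro n
  induction n with
  | zero =>
    intro cs hcs p
    have : cs = [] := List.eq_nil_of_length_eq_zero (Nat.le_zero.mp hcs)
    subst this; simp [pvLoopA, pvHi, pvRuns, pvEmit]
  | succ n ih =>
    intro cs hcs p
    match cs with
    | [] => simp [pvLoopA, pvHi, pvRuns, pvEmit]
    | c :: tail =>
      set k := pvClassify c with hk
      set us := tail.takeWhile (fun d => pvClassify d == pvClassify c) with hus
      set rest := tail.dropWhile (fun d => pvClassify d == pvClassify c) with hrest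
      have htail : tail = us ++ rest := (List.takeWhile_append_dropWhile).symm
      have hall : ∀ u ∈ us, pvClassify u = k := by
        intro u hu
        have := List.mem_takeWhile_imp (hus ▸ hu)
        simpa using this
      have hrlen : rest.length ≤ n := by
        have h1 : rest.length ≤ tail.length := List.length_dropWhile_le _ _
        have h2 : tail.length + 1 ≤ n + 1 := by simpa using hcs
        omega
      have hrhead : ∀ d ds, rest = d :: ds → pvClassify d ≠ k := by
        intro d ds hdd hcls
        have := List.head?_dropWhile_not (fun d => pvClassify d == pvClassify c) tail
        rw [← hrest, hdd] at this
        simp [hcls, hk] at this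
      have hruns : pvRuns (c :: tail) = (k, c :: us) :: pvRuns rest := by
        rw [pvRuns]
      -- the junction contribution of prev q into rest equals B's emission decision
      have hjunction : ∀ q, (q = pvTokN ∧ k = 'N') ∨ (q = pvTokW ∧ k = 'W') →
          pvHi q rest = (match pvRuns rest with
            | [] => pvTok k
            | (k2, _) :: _ => if k2 = 'P' then [] else pvTok k) := by
        intro q hq
        match hr : rest with
        | [] =>
          rcases hq with ⟨hq1, hq2⟩ | ⟨hq1, hq2⟩ <;>
            simp [pvHi, pvRuns, pvTok, hq1, hq2]
        | d :: ds =>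
          have hd := hrhead d ds rfl
          rw [pvRuns]
          simp only [pvHi]
          rcases hq with ⟨hq1, hq2⟩ | ⟨hq1, hq2⟩
          · -- k = 'N', q = nTok: emit nTok iff classify d ≠ 'P', i.e. = 'W'
            subst hq1
            rw [hq2] at hd
            by_cases hdP : pvClassify d = 'P'
            · rw [if_pos hdP]
              simp [hdP]
            · rw [if_neg hdP]
              have hdW : pvClassify d = 'W' := by
                by_cases h1 : d ∈ pvPunct
                · exact absurd (by simp [pvClassify, h1]) hdP
                · by_cases h2 : PySem.Chars.isdigit d
                  · exact absurd (by simp [pvClassify, h1, h2]) hd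
                  · simp [pvClassify, h1, h2]
              rw [hq2, if_neg (fun h : _ ∧ _ => pv_tokNW h.2),
                if_pos (And.intro hdW rfl)]
              simp [pvTok]
          · subst hq1
            rw [hq2] at hd
            by_cases hdP : pvClassify d = 'P'
            · rw [if_pos hdP]
              simp [hdP]
            · rw [if_neg hdP]
              have hdN : pvClassify d = 'N' := by
                by_cases h1 : d ∈ pvPunct
                · exact absurd (by simp [pvClassify, h1]) hdP
                · by_cases h2 : PySem.Chars.isdigit d
                  · simp [pvClassify, h1, h2]
                  · exact absurd (by simp [pvClassify, h1, h2]) hd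
              rw [hq2, if_pos (And.intro hdN rfl)]
              simp [pvTok]
      rw [hruns]
      by_cases hcP : c ∈ pvPunct
      · -- punctuation run
        have hkP : k = 'P' := by simp [hk, pvClassify, hcP]
        have : pvLoopA p (c :: tail) =
            (c :: us ++ (pvLoopA [] rest).1, (pvLoopA [] rest).2) := by
          rw [pvLoopA, if_pos (by simpa using hcP), htail,
            pv_loopA_punct_run us (fun u hu => (hall u hu).trans hkP) rest]
          rfl
        rw [this]
        have hhiP : pvHi p (c :: tail) = [] := by
          simp [pvHi, ← hk, hkP]
        have hIH := ih rest hrlen ([] : List Char)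
        rw [pv_hi_nil] at hIH
        rw [hhiP, List.nil_append]
        simp only [pvEmit]
        rw [if_pos hkP]
        simp only [List.cons_append, List.append_assoc, hIH, List.nil_append]
      · by_cases hcD : PySem.Chars.isdigit c
        · -- digit run
          have hkN : k = 'N' := by simp [hk, pvClassify, hcP, hcD]
          have : pvLoopA p (c :: tail) =
              ((if p = pvTokW then pvTokW else []) ++ (pvLoopA pvTokN rest).1,
                (pvLoopA pvTokN rest).2) := by
            rw [pvLoopA, if_neg (by simpa using hcP), if_pos hcD, htail,
              pv_loopA_digit_run us (fun u hu => (hall u hu).trans hkN) rest]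
          rw [this]
          have hIH := ih rest hrlen pvTokN
          have hj := hjunction pvTokN (Or.inl ⟨rfl, hkN⟩)
          have hhi : pvHi p (c :: tail) = (if p = pvTokW then pvTokW else []) := by
            simp [pvHi, ← hk, hkN]
          rw [hhi]
          simp only [pvEmit]
          rw [if_neg (show ¬ k = 'P' by rw [hkN]; decide), ← hj]
          simp only [List.append_assoc, hIH]
        · -- word run
          have hkW : k = 'W' := by simp [hk, pvClassify, hcP, hcD]
          have : pvLoopA p (c :: tail) =
              ((if p = pvTokN then pvTokN else []) ++ (pvLoopA pvTokW rest).1,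
                (pvLoopA pvTokW rest).2) := by
            rw [pvLoopA, if_neg (by simpa using hcP), if_neg hcD, htail,
              pv_loopA_word_run us (fun u hu => (hall u hu).trans hkW) rest]
          rw [this]
          have hIH := ih rest hrlen pvTokW
          have hj := hjunction pvTokW (Or.inr ⟨rfl, hkW⟩)
          have hhi : pvHi p (c :: tail) = (if p = pvTokN then pvTokN else []) := by
            simp [pvHi, ← hk, hkW]
          rw [hhi]
          simp only [pvEmit]
          rw [if_neg (show ¬ k = 'P' by rw [hkW]; decide), ← hj]
          simp only [List.append_assoc, hIH]

-- ===== VERDICT (by name: the statement is the Claim_ definition above) =====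
theorem find_pattern_spec : Claim_equal_find_pattern := by
  intro word _
  unfold Spec_find_pattern find_pattern find_pattern_alt
  split_ifs with h1 h2
  · rfl
  · rfl
  · have := pv_main word.toList.length word.toList (le_refl _) []
    rw [pv_hi_nil] at this
    rw [List.nil_append] at this
    rw [pv_foldl_eq_loopA]
    show String.ofList ([] ++ (pvLoopA [] word.toList).1 ++ (pvLoopA [] word.toList).2) =
      String.ofList (pvEmit (pvRuns word.toList))
    rw [List.nil_append, this]
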